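-- pv_equiv track=rewrite | github.com/mikemcghen/Hugo | core/agents/search_agent.py | _is_entertainment_query
-- ===== SOURCE A (Python) =====
-- def _is_entertainment_query(query: str) -> bool:
--     """
--     Detect if query is entertainment-related.
--
--     Args:
--         query: Search query
--
--     Returns:
--         True if entertainment-related
--     """
--     entertainment_keywords = [
--         'movie', 'film', 'actor', 'actress', 'director', 'cast',
--         'tv show', 'series', 'episode', 'season', 'release date',
--         'premiere', 'starring', 'wicked', 'dune', 'avatar',
--         'marvel', 'dc', 'star wars', 'netflix', 'hbo'
--     ]
--
--     query_lower = query.lower()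
--     return any(keyword in query_lower for keyword in entertainment_keywords)
-- ===== SOURCE B (Python) =====
-- _KEYWORDS = (
--     'movie', 'film', 'actor', 'actress', 'director', 'cast',
--     'tv show', 'series', 'episode', 'season', 'release date',
--     'premiere', 'starring', 'wicked', 'dune', 'avatar',
--     'marvel', 'dc', 'star wars', 'netflix', 'hbo'
-- )
--
--
-- def _is_entertainment_query(query: str) -> bool:
--     """Single left-to-right scan: at each position of the lowercased query,
--     test whether any keyword starts there (instead of one full substring
--     search per keyword)."""
--     q = query.lower()
--     for i in range(len(q)):
--         for kw in _KEYWORDS: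
--             if q.startswith(kw, i):
--                 return True
--     return False
-- ===== Notes on version B (the rewrite author's own statement) =====
-- stated objective: alternative
-- what changed: B makes one left-to-right pass over the lowercased query, testing at each position whether any keyword starts there (and returning at the first match position), instead of A's separate full substring scan per keyword.
import Mathlib
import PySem

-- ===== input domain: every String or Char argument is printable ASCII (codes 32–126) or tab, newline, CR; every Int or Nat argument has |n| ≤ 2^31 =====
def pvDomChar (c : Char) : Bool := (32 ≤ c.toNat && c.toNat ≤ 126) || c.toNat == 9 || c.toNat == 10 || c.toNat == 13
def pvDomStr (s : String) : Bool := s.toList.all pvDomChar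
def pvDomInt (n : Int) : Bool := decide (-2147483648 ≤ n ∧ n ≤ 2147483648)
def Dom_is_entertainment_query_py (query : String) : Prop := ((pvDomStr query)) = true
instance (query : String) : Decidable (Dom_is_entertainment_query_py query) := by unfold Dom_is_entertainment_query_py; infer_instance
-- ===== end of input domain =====

-- B replaces A's per-keyword substring scans by one positional left-to-right scan
-- of the lowercased query (alternative traversal, same result).

-- ===== PORT A =====
def pvEntKeywords : List String :=
  ["movie", "film", "actor", "actress", "director", "cast",
   "tv show", "series", "episode", "season", "release date",
   "premiere", "starring", "wicked", "dune", "avatar",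
   "marvel", "dc", "star wars", "netflix", "hbo"]

def is_entertainment_query_py (query : String) : Bool :=
  let query_lower := PySem.Str.lower query
  pvEntKeywords.any (fun keyword => PySem.Str.isIn keyword query_lower)

-- ===== PORT B =====
def pvEntKeywordsB : List (List Char) :=
  ["movie".toList, "film".toList, "actor".toList, "actress".toList, "director".toList,
   "cast".toList, "tv show".toList, "series".toList, "episode".toList, "season".toList,
   "release date".toList, "premiere".toList, "starring".toList, "wicked".toList,
   "dune".toList, "avatar".toList, "marvel".toList, "dc".toList, "star wars".toList,
   "netflix".toList, "hbo".toList]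

-- the loop 'for i in range(len(q)): if q.startswith(kw, i)' as structural recursion over suffixes
def pvScan : List Char → Bool
  | [] => false
  | c :: t => pvEntKeywordsB.any (fun kw => PySem.Chars.startswith (c :: t) kw) || pvScan t

def is_entertainment_query_py_alt (query : String) : Bool :=
  pvScan (PySem.Str.lower query).toList

-- ===== PRECONDITION & SPEC =====
def Spec_is_entertainment_query_py (query : String) (out : Bool) : Prop := out = is_entertainment_query_py_alt query
instance (query : String) (out : Bool) : Decidable (Spec_is_entertainment_query_py query out) := by unfold Spec_is_entertainment_query_py; infer_instance

-- ===== CLAIM (what is proved, stated in full; the proofs are below) =====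
def Claim_equal_is_entertainment_query_py : Prop := ∀ (query : String), Dom_is_entertainment_query_py query → Spec_is_entertainment_query_py query (is_entertainment_query_py query)

-- ===== LEMMAS AND PROOFS =====
theorem pvEntKeywordsB_ne_nil : ∀ kw ∈ pvEntKeywordsB, kw ≠ [] := by decide

theorem pvScan_iff (s : List Char) :
    pvScan s = true ↔ ∃ kw ∈ pvEntKeywordsB, kw <:+: s := by
  induction s with
  | nil =>
    simp only [pvScan, Bool.false_eq_true, false_iff]
    rintro ⟨kw, hmem, hinf⟩
    exact pvEntKeywordsB_ne_nil kw hmem (List.infix_nil.mp hinf)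
  | cons c t ih =>
    simp only [pvScan, Bool.or_eq_true, List.any_eq_true, PySem.Chars.startswith_iff, ih,
      List.infix_cons_iff]
    constructor
    · rintro (⟨kw, hm, h⟩ | ⟨kw, hm, h⟩)
      · exact ⟨kw, hm, Or.inl h⟩
      · exact ⟨kw, hm, Or.inr h⟩
    · rintro ⟨kw, hm, h | h⟩
      · exact Or.inl ⟨kw, hm, h⟩
      · exact Or.inr ⟨kw, hm, h⟩

theorem pvKeywords_map : pvEntKeywords.map String.toList = pvEntKeywordsB := by decide

-- ===== VERDICT (by name: the statement is the Claim_ definition above) =====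
theorem is_entertainment_query_py_spec : Claim_equal_is_entertainment_query_py := by
  intro query _
  unfold Spec_is_entertainment_query_py
  unfold is_entertainment_query_py is_entertainment_query_py_alt
  rw [Bool.eq_iff_iff]
  rw [pvScan_iff, ← pvKeywords_map]
  simp only [List.any_eq_true, PySem.Str.isIn_iff_infix, List.mem_map]
  constructor
  · rintro ⟨kw, hm, h⟩
    exact ⟨kw.toList, ⟨kw, hm, rfl⟩, h⟩
  · rintro ⟨_, ⟨kw, hm, rfl⟩, h⟩
    exact ⟨kw, hm, h⟩
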